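-- pv_equiv track=rewrite | github.com/Mcgode/TIPE | Utils.py | max_spe
-- ===== SOURCE A (Python) =====
-- def max_spe(t):
--     l = len(t[0])
--     maxima = [e for e in t[0]]
--
--     for i in range(len(t)):
--         for j in range(l):
--             if t[i][j] > maxima[j]:
--                 maxima[j] = t[i][j]
--
--     return maxima
-- ===== SOURCE B (Python) =====
-- def max_spe(t):
--     return [max(col) for col in zip(*t)]
-- ===== Notes on version B (the rewrite author's own statement) =====
-- stated objective: idiomatic
-- what changed: B transposes the matrix with zip(*t) and takes max of each column in one comprehension, instead of A's row-major double loop maintaining a running-max array seeded from row 0.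
import Mathlib
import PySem

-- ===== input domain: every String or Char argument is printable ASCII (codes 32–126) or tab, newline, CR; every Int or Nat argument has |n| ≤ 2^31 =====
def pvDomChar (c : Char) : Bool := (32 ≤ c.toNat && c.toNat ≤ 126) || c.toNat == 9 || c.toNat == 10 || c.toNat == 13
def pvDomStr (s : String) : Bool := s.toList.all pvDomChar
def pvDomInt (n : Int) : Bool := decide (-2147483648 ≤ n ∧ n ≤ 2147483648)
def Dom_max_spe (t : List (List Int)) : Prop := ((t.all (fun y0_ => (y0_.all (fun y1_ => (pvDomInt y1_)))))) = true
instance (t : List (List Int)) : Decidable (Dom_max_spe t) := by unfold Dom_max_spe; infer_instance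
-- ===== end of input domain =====

-- B replaces A's row-major running-max double loop by zip(*t) transposition with a per-column max (idiomatic; return-value equivalence, no mutation involved).

-- ===== PORT A =====
-- inner loop: for j in range(l): if t[i][j] > maxima[j]: maxima[j] = t[i][j]
def maxSpeInner (row : List Int) (l : Int) (m : List Int) : List Int :=
  (PySem.List.pyRange 0 l 1).foldl (fun m j =>
    let v := PySem.List.pyGetD row j 0
    if v > PySem.List.pyGetD m j 0 then PySem.List.pySetD m j v else m) m

def max_spe (t : List (List Int)) : List Int :=
  let l : Int := PySem.List.len (PySem.List.pyGetD t 0 [])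
  let maxima : List Int := (PySem.List.pyGetD t 0 []).map (fun e => e)
  (PySem.List.pyRange 0 (PySem.List.len t) 1).foldl
    (fun m i => maxSpeInner (PySem.List.pyGetD t i []) l m) maxima

-- ===== PORT B =====
-- zip(*t): hand port (no variadic zip in PySem) — columns 0..min(len r)−1, truncating like Python's zip; exact for list-of-lists input
def pyZipStar (t : List (List Int)) : List (List Int) :=
  match t with
  | [] => []
  | r :: rs =>
      (List.range (rs.foldl (fun n s => min n s.length) r.length)).map
        (fun j => (r :: rs).map (fun row => row.getD j 0))

def max_spe_alt (t : List (List Int)) : List Int :=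
  (pyZipStar t).map (fun col => (PySem.List.max? col (fun y => y)).getD 0)

-- ===== PRECONDITION & SPEC =====
-- Pre_ excludes exactly the inputs where A raises IndexError: the empty matrix (t[0]) and matrices with a row shorter than row 0 (t[i][j]).
def Pre_max_spe (t : List (List Int)) : Prop :=
  t ≠ [] ∧ ∀ r ∈ t, (t.headD []).length ≤ r.length
instance (t : List (List Int)) : Decidable (Pre_max_spe t) := by unfold Pre_max_spe; infer_instance

def pvWitness_max_spe : List (List Int) := [[1, 2], [3, 0]]

def Spec_max_spe (t : List (List Int)) (out : List Int) : Prop := out = max_spe_alt t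
instance (t : List (List Int)) (out : List Int) : Decidable (Spec_max_spe t out) := by unfold Spec_max_spe; infer_instance

-- ===== CLAIM (what is proved, stated in full; the proofs are below) =====
def Claim_equal_max_spe : Prop := ∀ (t : List (List Int)), Dom_max_spe t → Pre_max_spe t → Spec_max_spe t (max_spe t)

-- ===== LEMMAS AND PROOFS =====

theorem inner_length (row : List Int) (n : Nat) (m : List Int) :
    (maxSpeInner row (n : Int) m).length = m.length := by
  induction n generalizing m with
  | zero => simp [maxSpeInner]
  | succ k ih =>
      unfold maxSpeInner at *
      push_cast
      rw [PySem.List.pyRange_one_succ_right (by positivity), List.foldl_append]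
      simp only [List.foldl_cons, List.foldl_nil]
      split <;> simp [PySem.List.pySetD_natCast, ih]

theorem inner_getD (row : List Int) (n : Nat) (m : List Int) (hn : n ≤ m.length) (j : Nat) :
    (maxSpeInner row (n : Int) m).getD j 0 =
      if j < n then max (m.getD j 0) (row.getD j 0) else m.getD j 0 := by
  induction n generalizing m j with
  | zero => simp [maxSpeInner]
  | succ k ih =>
      unfold maxSpeInner at *
      push_cast
      rw [PySem.List.pyRange_one_succ_right (by positivity), List.foldl_append]
      simp only [List.foldl_cons, List.foldl_nil]
      have hk : k ≤ m.length := by omega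
      have hlen : ((PySem.List.pyRange 0 (k : Int) 1).foldl (fun m j =>
          let v := PySem.List.pyGetD row j 0
          if v > PySem.List.pyGetD m j 0 then PySem.List.pySetD m j v else m) m).length = m.length :=
        inner_length row k m
      set M := (PySem.List.pyRange 0 (k : Int) 1).foldl (fun m j =>
          let v := PySem.List.pyGetD row j 0
          if v > PySem.List.pyGetD m j 0 then PySem.List.pySetD m j v else m) m with hM
      have hMk : M.getD k 0 = m.getD k 0 := by simpa using ih m hk k
      have hMj : ∀ j' : Nat, M.getD j' 0 = if j' < k then max (m.getD j' 0) (row.getD j' 0) else m.getD j' 0 :=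
        fun j' => ih m hk j'
      simp only [PySem.List.pyGetD_natCast, PySem.List.pySetD_natCast]
      by_cases hgt : row.getD k 0 > M.getD k 0
      · rw [if_pos hgt]
        rcases Nat.lt_trichotomy j k with hjk | hjk | hjk
        · rw [List.getD_eq_getElem?_getD, List.getElem?_set_ne (by omega),
            ← List.getD_eq_getElem?_getD, hMj j]
          simp [hjk, Nat.lt_succ_of_lt hjk]
        · subst hjk
          rw [List.getD_eq_getElem?_getD, List.getElem?_set_self (by omega),
            Option.getD_some, if_pos (Nat.lt_succ_self _)]
          rw [hMk] at hgt
          exact (max_eq_right (le_of_lt hgt)).symm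
        · rw [List.getD_eq_getElem?_getD, List.getElem?_set_ne (by omega),
            ← List.getD_eq_getElem?_getD, hMj j]
          have h1 : ¬ j < k := by omega
          have h2 : ¬ j < k + 1 := by omega
          simp [h1, h2]
      · rw [if_neg hgt, hMj j]
        rcases Nat.lt_trichotomy j k with hjk | hjk | hjk
        · simp [hjk, Nat.lt_succ_of_lt hjk]
        · subst hjk
          rw [hMk] at hgt
          simp only [Nat.lt_irrefl, if_false, Nat.lt_succ_self, if_true]
          omega
        · have h1 : ¬ j < k := by omega
          have h2 : ¬ j < k + 1 := by omega
          simp [h1, h2]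

-- outer loop invariant: folding maxSpeInner over the rows takes running column maxima, entrywise
theorem outer_fold (L : Nat) (ls : List (List Int)) (s : List Int) (hs : s.length = L) :
    (ls.foldl (fun m row => maxSpeInner row (L : Int) m) s).length = L ∧
    ∀ j : Nat, j < L →
      (ls.foldl (fun m row => maxSpeInner row (L : Int) m) s).getD j 0 =
        ls.foldl (fun acc row => max acc (row.getD j 0)) (s.getD j 0) := by
  induction ls generalizing s with
  | nil => exact ⟨hs, fun j _ => rfl⟩
  | cons r rs ih =>
      have h1 : (maxSpeInner r (L : Int) s).length = L := by rw [inner_length]; exact hs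
      obtain ⟨hlen, hval⟩ := ih (maxSpeInner r (L : Int) s) h1
      refine ⟨hlen, fun j hj => ?_⟩
      simp only [List.foldl_cons]
      rw [hval j hj, inner_getD r L s (by omega) j, if_pos hj]

theorem min_fold_eq (r : List Int) (rs : List (List Int))
    (h : ∀ s ∈ rs, r.length ≤ s.length) :
    rs.foldl (fun n s => min n s.length) r.length = r.length := by
  induction rs with
  | nil => rfl
  | cons x xs ih =>
      simp only [List.foldl_cons]
      rw [min_eq_left (h x (List.mem_cons_self))]
      exact ih (fun s hs => h s (List.mem_cons_of_mem x hs))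

-- ===== VERDICT (by name: the statement is the Claim_ definition above) =====
theorem max_spe_spec : Claim_equal_max_spe := by
  intro t _ hpre
  obtain ⟨hne, hlen⟩ := hpre
  obtain ⟨r, rs, rfl⟩ := List.exists_cons_of_ne_nil hne
  unfold Spec_max_spe
  simp only [List.headD_cons] at hlen
  rw [show max_spe_alt (r :: rs) = (List.range (rs.foldl (fun n s => min n s.length) r.length)).map
      (fun j => (PySem.List.max? ((r :: rs).map (fun row => row.getD j 0)) (fun y => y)).getD 0) by
    simp [max_spe_alt, pyZipStar]]
  rw [min_fold_eq r rs (fun s hs => hlen s (List.mem_cons_of_mem r hs))]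
  simp only [max_spe, PySem.List.pyGetD_zero_cons, PySem.List.len_eq, List.map_id_fun', id]
  -- outer loop: replace pyRange-indexed fold over t by a structural fold over the rows
  rw [show ((r :: rs).length : Int) = PySem.List.len (r :: rs) by simp [PySem.List.len_eq]]
  rw [PySem.List.foldl_pyRange_zero_pyGetD (r :: rs) ([] : List Int)
      (fun m row => maxSpeInner row ((r.length : Nat) : Int) m) r]
  obtain ⟨halen, haval⟩ := outer_fold r.length (r :: rs) r rfl
  rw [List.foldl_cons] at halen
  have haval' : ∀ j : Nat, j < r.length →
      (rs.foldl (fun m row => maxSpeInner row ((r.length : Nat) : Int) m)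
        (maxSpeInner r ((r.length : Nat) : Int) r)).getD j 0 =
      rs.foldl (fun acc row => max acc (row.getD j 0)) (r.getD j 0) := by
    intro j hj
    have := haval j hj
    rw [List.foldl_cons, List.foldl_cons, max_self] at this
    exact this
  apply List.ext_getElem
  · simp [halen]
  · intro j hj1 hj2
    have hjL : j < r.length := by simpa [halen] using hj1
    have hj1' : j < (rs.foldl (fun m row => maxSpeInner row ((r.length : Nat) : Int) m)
        (maxSpeInner r ((r.length : Nat) : Int) r)).length := by rw [halen]; exact hjL
    have hA := haval' j hjL
    rw [List.getD_eq_getElem?_getD, List.getElem?_eq_getElem hj1', Option.getD_some] at hA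
    have hB : (PySem.List.max? ((r :: rs).map (fun row => row.getD j 0)) (fun y => y)).getD 0
        = rs.foldl (fun acc row => max acc (row.getD j 0)) (r.getD j 0) := by
      rw [show ((r :: rs).map (fun row => row.getD j 0))
            = (r.getD j 0) :: rs.map (fun row => row.getD j 0) from rfl,
        PySem.List.max?_id_cons, Option.getD_some, List.foldl_map]
    simp only [List.getElem_map, List.getElem_range]
    exact hA.trans hB.symm
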